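-- pv_equiv track=rewrite | github.com/alexj136/offsong | webchord.py | parse_chopro_line
-- ===== SOURCE A (Python) =====
-- from typing import List, Tuple
--
-- def parse_chopro_line(line: str, mode: int) -> str:
--     """
--     Parse a single ChordPro content line (not a directive).
--
--     Returns HTML representing either a <BR>, a <DIV> with lyrics only,
--     or a <TABLE> with chords above lyrics, using the same CSS class names
--     as the original Perl script.
--     """
--     # mode = 0 normal, 1 chorus, 2 normal+tab, 3 chorus+tab
--     l_classes = ["lyrics", "lyrics_chorus", "lyrics_tab", "lyrics_chorus_tab"]
--     c_classes = ["chords", "chords_chorus", "chords_tab", "chords_chorus_tab"]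
--
--     # Replace spaces with &nbsp; to preserve alignment (like Perl version)
--     line = line.replace(" ", "&nbsp;")
--
--     chords: List[str] = [""]
--     lyrics: List[str] = []
--
--     rest = line
--     while True:
--         # Find next [chord]
--         start = rest.find("[")
--         if start == -1:
--             break
--         end = rest.find("]", start + 1)
--         if end == -1:
--             break
--
--         before = rest[:start]
--         chord = rest[start + 1 : end]
--         after = rest[end + 1 :]
--
--         lyrics.append(before)
--
--         # In the Perl version there is a special-case for '\|', but that
--         # is an edge case; here we just pass the chord through unchanged.
--         chords.append(chord)
--
--         rest = after
--
--     # Remaining lyrics after last chord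
--     lyrics.append(rest)
--
--     # If line began with a chord, first lyrics and chord entries are empty
--     if lyrics and lyrics[0] == "":
--         chords = chords[1:]
--         lyrics = lyrics[1:]
--
--     # Empty line?
--     if not lyrics or all(part == "" for part in lyrics):
--         return "<BR>\n"
--
--     # Line without chords
--     if len(lyrics) == 1 and (not chords or chords[0] == ""):
--         return f'<DIV class="{l_classes[mode]}">{lyrics[0]}</DIV>\n'
--
--     # Line with chords -> two-row table
--     out = []
--     out.append('<TABLE cellpadding="0" cellspacing="0">')
--     # Chords row
--     out.append("<TR>")
--     for c in chords:
--         out.append(f'<TD class="{c_classes[mode]}">{c}</TD>')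
--     out.append("</TR>")
--     # Lyrics row
--     out.append("<TR>")
--     for l in lyrics:
--         out.append(f'<TD class="{l_classes[mode]}">{l}</TD>')
--     out.append("</TR></TABLE>\n")
--     return "".join(out)
-- ===== SOURCE B (Python) =====
-- def parse_chopro_line(line: str, mode: int) -> str:
--     """Single-pass character state machine: scan the line once, switching
--     between lyric and chord state at '[' / ']', expanding spaces to &nbsp;
--     on the fly, then emit <BR>, a lyrics <DIV> or the two-row chord table."""
--     l_classes = ["lyrics", "lyrics_chorus", "lyrics_tab", "lyrics_chorus_tab"]
--     c_classes = ["chords", "chords_chorus", "chords_tab", "chords_chorus_tab"]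
--
--     chords = [""]
--     lyrics = []
--     buf = []            # current lyric text
--     chord_buf = None    # not None while inside [ ... ]
--     for ch in line:
--         if ch == " ":
--             (buf if chord_buf is None else chord_buf).append("&nbsp;")
--         elif chord_buf is None:
--             if ch == "[":
--                 chord_buf = []
--             else:
--                 buf.append(ch)
--         elif ch == "]":
--             chords.append("".join(chord_buf))
--             lyrics.append("".join(buf))
--             buf = []
--             chord_buf = None
--         else:
--             chord_buf.append(ch)
--     if chord_buf is not None:       # unmatched '[': the tail is plain lyrics
--         buf.append("[" + "".join(chord_buf))
--     lyrics.append("".join(buf))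
--
--     if lyrics[0] == "":
--         chords = chords[1:]
--         lyrics = lyrics[1:]
--
--     if all(part == "" for part in lyrics):
--         return "<BR>\n"
--
--     if len(lyrics) == 1 and (not chords or chords[0] == ""):
--         return f'<DIV class="{l_classes[mode]}">{lyrics[0]}</DIV>\n'
--
--     cells_c = "".join(f'<TD class="{c_classes[mode]}">{c}</TD>' for c in chords)
--     cells_l = "".join(f'<TD class="{l_classes[mode]}">{l}</TD>' for l in lyrics)
--     return ('<TABLE cellpadding="0" cellspacing="0"><TR>' + cells_c
--             + "</TR><TR>" + cells_l + "</TR></TABLE>\n")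
-- ===== Notes on version B (the rewrite author's own statement) =====
-- stated objective: alternative
-- what changed: B replaces A's replace()-then-shrinking find('[')/find(']')-and-slice loop by a single-pass character state machine that expands spaces to &nbsp; on the fly and switches between lyric and chord buffers at '[' / ']', then emits the same <BR>/<DIV>/<TABLE> HTML.
import Mathlib
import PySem

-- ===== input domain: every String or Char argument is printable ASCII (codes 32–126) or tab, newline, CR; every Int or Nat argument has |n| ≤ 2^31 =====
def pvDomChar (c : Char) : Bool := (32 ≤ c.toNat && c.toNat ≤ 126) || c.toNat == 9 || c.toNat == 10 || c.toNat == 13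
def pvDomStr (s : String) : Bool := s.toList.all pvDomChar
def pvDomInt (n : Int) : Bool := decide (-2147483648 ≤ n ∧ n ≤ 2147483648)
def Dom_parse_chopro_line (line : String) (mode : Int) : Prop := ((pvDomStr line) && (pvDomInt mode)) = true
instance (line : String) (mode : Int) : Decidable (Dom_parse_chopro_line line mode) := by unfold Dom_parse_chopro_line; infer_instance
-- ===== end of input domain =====

-- B is an alternative single-pass character state machine replacing A's replace()-then-find/slice
-- shrinking loop; same return value on all of Pre_ (no side effects in either program).

set_option maxHeartbeats 1000000

-- ===== PORT A =====

-- A's while-loop: repeatedly find '[' then ']', slicing off before/chord/after.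
def aLoop (rest : List Char) (chords lyrics : List (List Char)) :
    List (List Char) × List (List Char) × List Char :=
  -- start = rest.find("[") ; stop when -1
  if h1 : PySem.Chars.find rest ['['] = -1 then (chords, lyrics, rest)
  else
    -- end = rest.find("]", start + 1) ; stop when -1
    if h2 : PySem.Chars.findFrom rest [']'] (PySem.Chars.find rest ['['] + 1) = -1 then
      (chords, lyrics, rest)
    else
      -- before = rest[:start]; chord = rest[start+1:end]; after = rest[end+1:]
      aLoop (PySem.Chars.slice rest
          (some (PySem.Chars.findFrom rest [']'] (PySem.Chars.find rest ['['] + 1) + 1)) none)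
        (chords ++ [PySem.Chars.slice rest (some (PySem.Chars.find rest ['['] + 1))
          (some (PySem.Chars.findFrom rest [']'] (PySem.Chars.find rest ['['] + 1)))])
        (lyrics ++ [PySem.Chars.slice rest none (some (PySem.Chars.find rest ['[']))])
termination_by rest.length
decreasing_by
  have hm1 := PySem.Chars.neg_one_le_find rest ['[']
  have h0 : 0 ≤ PySem.Chars.find rest ['['] := by omega
  obtain ⟨hpre, -⟩ := PySem.Chars.find_spec (s := rest) (sub := ['[']) h0
  have hlt : (PySem.Chars.find rest ['[']).toNat < rest.length := by
    rcases hpre with ⟨t, ht⟩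
    by_contra hge
    rw [List.drop_eq_nil_of_le (by omega)] at ht
    simp at ht
  have hcast : PySem.Chars.find rest ['['] + 1
      = (((PySem.Chars.find rest ['[']).toNat + 1 : Nat) : Int) := by omega
  have hk : (PySem.Chars.find rest ['[']).toNat + 1 ≤ rest.length := hlt
  have h2' : PySem.Chars.findFrom rest [']']
      (((PySem.Chars.find rest ['[']).toNat + 1 : Nat) : Int) ≠ -1 := by
    rw [← hcast]; exact h2
  obtain ⟨hke, hpre2, -⟩ := PySem.Chars.findFrom_natCast_spec rest [']']
      ((PySem.Chars.find rest ['[']).toNat + 1) hk h2'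
  have hlt2 : (PySem.Chars.findFrom rest [']']
      (((PySem.Chars.find rest ['[']).toNat + 1 : Nat) : Int)).toNat < rest.length := by
    rcases hpre2 with ⟨t, ht⟩
    by_contra hge
    rw [List.drop_eq_nil_of_le (by omega)] at ht
    simp at ht
  have h0e : 0 ≤ PySem.Chars.findFrom rest [']']
      (((PySem.Chars.find rest ['[']).toNat + 1 : Nat) : Int) := by omega
  rw [hcast, PySem.Chars.slice_eq_listSlice, PySem.List.slice_from _ (by omega)]
  simp only [List.length_drop]
  omega

-- The tail of Python's processing: append the remaining lyrics, strip a leading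
-- empty chord/lyric pair, and emit <BR> / <DIV> / <TABLE> exactly as A does.
-- Python's l_classes[mode] / c_classes[mode] raises IndexError for mode outside
-- [-4,3]; the port totalises that raise with .getD [] (excluded by Pre_).
def aPost (mode : Int) (r : List (List Char) × List (List Char) × List Char) : String :=
  let lcs : List (List Char) := ["lyrics".toList, "lyrics_chorus".toList,
    "lyrics_tab".toList, "lyrics_chorus_tab".toList]
  let ccs : List (List Char) := ["chords".toList, "chords_chorus".toList,
    "chords_tab".toList, "chords_chorus_tab".toList]
  let lyrics0 := r.2.1 ++ [r.2.2]
  let chords0 := r.1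
  let strp := if lyrics0 ≠ [] ∧ lyrics0.headD [] = [] then
      (PySem.List.slice chords0 (some 1) none, PySem.List.slice lyrics0 (some 1) none)
    else (chords0, lyrics0)
  let chords := strp.1
  let lyrics := strp.2
  if lyrics = [] ∨ lyrics.all (fun p => p == []) then "<BR>\n"
  else if lyrics.length = 1 ∧ (chords = [] ∨ chords.headD [] = []) then
    String.mk ("<DIV class=\"".toList ++ (PySem.List.pyGet? lcs mode).getD []
      ++ "\">".toList ++ lyrics.headD [] ++ "</DIV>\n".toList)
  else
    let out : List (List Char) := ["<TABLE cellpadding=\"0\" cellspacing=\"0\">".toList]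
    let out := out ++ ["<TR>".toList]
    let out := chords.foldl (fun acc c => acc ++ ["<TD class=\"".toList
      ++ (PySem.List.pyGet? ccs mode).getD [] ++ "\">".toList ++ c ++ "</TD>".toList]) out
    let out := out ++ ["</TR>".toList]
    let out := out ++ ["<TR>".toList]
    let out := lyrics.foldl (fun acc l => acc ++ ["<TD class=\"".toList
      ++ (PySem.List.pyGet? lcs mode).getD [] ++ "\">".toList ++ l ++ "</TD>".toList]) out
    let out := out ++ ["</TR></TABLE>\n".toList]
    String.mk (PySem.Chars.join [] out)

def parse_chopro_line (line : String) (mode : Int) : String :=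
  aPost mode (aLoop (PySem.Chars.replace line.toList [' '] "&nbsp;".toList) [[]] [])

-- ===== PORT B =====

-- B's for-loop: one pass over the characters, expanding spaces inline and
-- switching between the lyric buffer and a chord buffer at '[' / ']'.
def bLoop : List Char → List (List Char) → List (List Char) → List Char → Option (List Char) →
    List (List Char) × List (List Char) × List Char × Option (List Char)
  | [], chords, lyrics, buf, cb => (chords, lyrics, buf, cb)
  | c :: cs, chords, lyrics, buf, none =>
    if c = ' ' then bLoop cs chords lyrics (buf ++ "&nbsp;".toList) none
    else if c = '[' then bLoop cs chords lyrics buf (some [])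
    else bLoop cs chords lyrics (buf ++ [c]) none
  | c :: cs, chords, lyrics, buf, some x =>
    if c = ' ' then bLoop cs chords lyrics buf (some (x ++ "&nbsp;".toList))
    else if c = ']' then bLoop cs (chords ++ [x]) (lyrics ++ [buf]) [] none
    else bLoop cs chords lyrics buf (some (x ++ [c]))

-- Source B's tail: strip the leading empty pair, then <BR> / <DIV> / joined cell rows.
def bPost (mode : Int) (chords0 lyrics0 : List (List Char)) : String :=
  let lcs : List (List Char) := ["lyrics".toList, "lyrics_chorus".toList,
    "lyrics_tab".toList, "lyrics_chorus_tab".toList]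
  let ccs : List (List Char) := ["chords".toList, "chords_chorus".toList,
    "chords_tab".toList, "chords_chorus_tab".toList]
  let strp := if lyrics0.headD [] = [] then
      (PySem.List.slice chords0 (some 1) none, PySem.List.slice lyrics0 (some 1) none)
    else (chords0, lyrics0)
  let chords := strp.1
  let lyrics := strp.2
  if lyrics.all (fun p => p == []) then "<BR>\n"
  else if lyrics.length = 1 ∧ (chords = [] ∨ chords.headD [] = []) then
    String.mk ("<DIV class=\"".toList ++ (PySem.List.pyGet? lcs mode).getD []
      ++ "\">".toList ++ lyrics.headD [] ++ "</DIV>\n".toList)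
  else
    let cellsC := PySem.Chars.join [] (chords.map (fun c => "<TD class=\"".toList
      ++ (PySem.List.pyGet? ccs mode).getD [] ++ "\">".toList ++ c ++ "</TD>".toList))
    let cellsL := PySem.Chars.join [] (lyrics.map (fun l => "<TD class=\"".toList
      ++ (PySem.List.pyGet? lcs mode).getD [] ++ "\">".toList ++ l ++ "</TD>".toList))
    String.mk ("<TABLE cellpadding=\"0\" cellspacing=\"0\"><TR>".toList ++ cellsC
      ++ "</TR><TR>".toList ++ cellsL ++ "</TR></TABLE>\n".toList)

def parse_chopro_line_alt (line : String) (mode : Int) : String :=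
  let r := bLoop line.toList [[]] [] [] none
  let buf1 := match r.2.2.2 with | none => r.2.2.1 | some x => r.2.2.1 ++ '[' :: x
  bPost mode r.1 (r.2.1 ++ [buf1])

-- ===== PRECONDITION & SPEC =====

-- does the line consist solely of complete [..] chord chunks? (then A returns "<BR>\n"
-- without ever indexing the class lists, for every mode)
def pvBrOnly : List Char → Bool
  | [] => true
  | c :: cs =>
    if c = '[' then
      match h : cs.dropWhile (fun d => d ≠ ']') with
      | ']' :: rest => pvBrOnly rest
      | _ => false
    else false
termination_by l => l.length
decreasing_by
  have hle := List.length_dropWhile_le (fun d => d ≠ ']') cs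
  rw [h] at hle
  simp at hle
  simp
  omega

-- Pre_ excludes exactly the inputs on which A raises IndexError: a mode outside
-- Python's index range [-4, 3] for the 4-element class lists, except when the line is
-- only complete [..] chords, where A returns "<BR>\n" before any indexing happens.
def Pre_parse_chopro_line (line : String) (mode : Int) : Prop :=
  (-4 ≤ mode ∧ mode ≤ 3) ∨ pvBrOnly line.toList = true
instance (line : String) (mode : Int) : Decidable (Pre_parse_chopro_line line mode) := by
  unfold Pre_parse_chopro_line; infer_instance

def pvWitness_parse_chopro_line : String × Int := ("He[C]llo [G7]world", 1)

def Spec_parse_chopro_line (line : String) (mode : Int) (out : String) : Prop :=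
  out = parse_chopro_line_alt line mode
instance (line : String) (mode : Int) (out : String) :
    Decidable (Spec_parse_chopro_line line mode out) := by
  unfold Spec_parse_chopro_line; infer_instance

-- ===== CLAIM (what is proved, stated in full; the proofs are below) =====
def Claim_equal_parse_chopro_line : Prop := ∀ (line : String) (mode : Int),
  Dom_parse_chopro_line line mode → Pre_parse_chopro_line line mode →
  Spec_parse_chopro_line line mode (parse_chopro_line line mode)

-- ===== LEMMAS AND PROOFS =====

-- space expansion as a flatMap (what Python's line.replace(" ", "&nbsp;") does)
def spaceExp (s : List Char) : List Char :=
  s.flatMap (fun c => if c = ' ' then "&nbsp;".toList else [c])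

lemma replace_go_spec (l : List Char) : ∀ (fuel : Nat) (acc : List Char), l.length ≤ fuel →
    PySem.Chars.replace.go [' '] "&nbsp;".toList fuel l acc = acc.reverse ++ spaceExp l := by
  induction l with
  | nil =>
    intro fuel acc _
    cases fuel <;> simp [PySem.Chars.replace.go, spaceExp]
  | cons c t ih =>
    intro fuel acc hf
    cases fuel with
    | zero => simp at hf
    | succ n =>
      rw [PySem.Chars.replace.go]
      by_cases hc : c = ' '
      · subst hc
        have hpfx : [' '].isPrefixOf (' ' :: t) = true := by simp [List.isPrefixOf]
        rw [if_pos hpfx]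
        have hd : List.drop [' '].length (' ' :: t) = t := rfl
        rw [hd]
        simp only [List.length_cons] at hf
        rw [ih n _ (by omega)]
        simp [spaceExp]
      · have hpfx : [' '].isPrefixOf (c :: t) = false := by
          simp [List.isPrefixOf]
          exact fun h => (hc h.symm).elim
        rw [hpfx]
        simp only [Bool.false_eq_true, if_false]
        simp only [List.length_cons] at hf
        rw [ih n _ (by omega)]
        simp [spaceExp, hc]

lemma replace_space (s : List Char) :
    PySem.Chars.replace s [' '] "&nbsp;".toList = spaceExp s := by
  rw [PySem.Chars.replace]
  simp only [List.isEmpty_cons, Bool.false_eq_true, if_false]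
  exact replace_go_spec s s.length [] le_rfl

lemma no_space_spaceExp (s : List Char) : ' ' ∉ spaceExp s := by
  intro h
  simp only [spaceExp, List.mem_flatMap] at h
  obtain ⟨c, -, hc⟩ := h
  by_cases h1 : c = ' '
  · rw [if_pos h1] at hc
    exact absurd hc (by decide)
  · rw [if_neg h1] at hc
    simp only [List.mem_singleton] at hc
    exact h1 hc.symm

lemma bLoop_nbsp_none (cs : List Char) (ch ly : List (List Char)) (buf : List Char) :
    bLoop ("&nbsp;".toList ++ cs) ch ly buf none
      = bLoop cs ch ly (buf ++ "&nbsp;".toList) none := by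
  show bLoop ('&' :: 'n' :: 'b' :: 's' :: 'p' :: ';' :: cs) ch ly buf none = _
  simp [bLoop, List.append_assoc]

lemma bLoop_nbsp_some (cs : List Char) (ch ly : List (List Char)) (buf x : List Char) :
    bLoop ("&nbsp;".toList ++ cs) ch ly buf (some x)
      = bLoop cs ch ly buf (some (x ++ "&nbsp;".toList)) := by
  show bLoop ('&' :: 'n' :: 'b' :: 's' :: 'p' :: ';' :: cs) ch ly buf (some x) = _
  simp [bLoop, List.append_assoc]

lemma bLoop_spaceExp (cs : List Char) : ∀ (ch ly : List (List Char)) (buf : List Char)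
    (cb : Option (List Char)), bLoop cs ch ly buf cb = bLoop (spaceExp cs) ch ly buf cb := by
  induction cs with
  | nil => intro ch ly buf cb; simp [spaceExp]
  | cons c t ih =>
    intro ch ly buf cb
    by_cases hc : c = ' '
    · subst hc
      have hexp : spaceExp (' ' :: t) = "&nbsp;".toList ++ spaceExp t := by
        simp [spaceExp]
      rw [hexp]
      cases cb with
      | none =>
        rw [bLoop_nbsp_none]
        simp only [bLoop, if_pos rfl]
        exact ih _ _ _ _
      | some x =>
        rw [bLoop_nbsp_some]
        simp only [bLoop, if_pos rfl]
        exact ih _ _ _ _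
    · have hexp : spaceExp (c :: t) = c :: spaceExp t := by
        simp [spaceExp, hc]
      rw [hexp]
      cases cb with
      | none =>
        simp only [bLoop, if_neg hc]
        by_cases hb : c = '['
        · rw [if_pos hb, if_pos hb]; exact ih _ _ _ _
        · rw [if_neg hb, if_neg hb]; exact ih _ _ _ _
      | some x =>
        simp only [bLoop, if_neg hc]
        by_cases hb : c = ']'
        · rw [if_pos hb, if_pos hb]; exact ih _ _ _ _
        · rw [if_neg hb, if_neg hb]; exact ih _ _ _ _

-- find / findFrom evaluation on decomposed lists
lemma singleton_infix_iff (c : Char) (u : List Char) : [c] <:+: u ↔ c ∈ u := by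
  constructor
  · rintro ⟨s, t, rfl⟩; simp
  · intro h
    obtain ⟨s, t, rfl⟩ := List.append_of_mem h
    exact ⟨s, t, by simp⟩

lemma find_not_mem {c : Char} {u : List Char} (h : c ∉ u) :
    PySem.Chars.find u [c] = -1 :=
  (PySem.Chars.find_eq_neg_one_iff u [c]).2 (fun hin => h ((singleton_infix_iff c u).1 hin))

lemma find_at {c : Char} {u : List Char} (v : List Char) (h : c ∉ u) :
    PySem.Chars.find (u ++ c :: v) [c] = (u.length : Int) := by
  have hin : [c] <:+: (u ++ c :: v) := (singleton_infix_iff _ _).2 (by simp)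
  have h0 : 0 ≤ PySem.Chars.find (u ++ c :: v) [c] :=
    (PySem.Chars.find_nonneg_iff _ _).2 hin
  obtain ⟨hpre, hmin⟩ := PySem.Chars.find_spec h0
  set j := (PySem.Chars.find (u ++ c :: v) [c]).toNat with hj
  have hju : j ≤ u.length := by
    by_contra hgt
    exact hmin u.length (by omega) ⟨v, by simp⟩
  have hju' : j = u.length := by
    rcases Nat.lt_or_ge j u.length with hlt | hge
    · exfalso
      rcases hpre with ⟨t, ht⟩
      rw [List.drop_append_of_le_length (le_of_lt hlt)] at ht
      have hne : u.drop j ≠ [] := by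
        simp only [ne_eq, List.drop_eq_nil_iff]
        omega
      obtain ⟨d, u', hdu⟩ := List.exists_cons_of_ne_nil hne
      rw [hdu] at ht
      simp only [List.singleton_append, List.cons_append, List.cons.injEq] at ht
      have hdmem : d ∈ u := List.mem_of_mem_drop (by rw [hdu]; exact List.mem_cons_self)
      exact h (ht.1 ▸ hdmem)
    · omega
  omega

lemma aux_cast (u : List Char) : ((u.length : Int) + 1) = ((u.length + 1 : Nat) : Int) := by
  push_cast; ring

lemma findFrom_no_close (u x : List Char) (hx : ']' ∉ x) :
    PySem.Chars.findFrom (u ++ '[' :: x) [']'] ((u.length : Int) + 1) = -1 := by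
  rw [aux_cast, PySem.Chars.findFrom_natCast _ _ (u.length + 1) (by simp)]
  have hdrop : (u ++ '[' :: x).drop (u.length + 1) = x := by
    rw [show u ++ '[' :: x = (u ++ ['[']) ++ x by simp]
    rw [List.drop_left' (by simp)]
  rw [hdrop, find_not_mem hx]
  simp

lemma findFrom_close (u x v : List Char) (hx : ']' ∉ x) :
    PySem.Chars.findFrom (u ++ '[' :: (x ++ ']' :: v)) [']'] ((u.length : Int) + 1)
      = ((u.length + 1 + x.length : Nat) : Int) := by
  rw [aux_cast, PySem.Chars.findFrom_natCast _ _ (u.length + 1) (by simp)]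
  have hdrop : (u ++ '[' :: (x ++ ']' :: v)).drop (u.length + 1) = x ++ ']' :: v := by
    rw [show u ++ '[' :: (x ++ ']' :: v) = (u ++ ['[']) ++ (x ++ ']' :: v) by simp]
    rw [List.drop_left' (by simp)]
  rw [hdrop, find_at v hx]
  rw [if_neg (by omega)]
  push_cast
  ring

def cbRest : Option (List Char) → List Char
  | none => []
  | some x => '[' :: x

lemma aLoop_eq_bLoop : ∀ (cs : List Char) (ch ly : List (List Char)) (buf : List Char)
    (cb : Option (List Char)), ' ' ∉ cs → '[' ∉ buf → (∀ x, cb = some x → ']' ∉ x) →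
    aLoop (buf ++ cbRest cb ++ cs) ch ly =
      ((bLoop cs ch ly buf cb).1, (bLoop cs ch ly buf cb).2.1,
        (bLoop cs ch ly buf cb).2.2.1 ++ cbRest (bLoop cs ch ly buf cb).2.2.2) := by
  intro cs
  induction cs with
  | nil =>
    intro ch ly buf cb _ hbuf hcb
    cases cb with
    | none =>
      simp only [cbRest, List.append_nil, bLoop]
      rw [aLoop.eq_def]
      rw [dif_pos (by rw [find_not_mem hbuf])]
    | some x =>
      simp only [cbRest, List.append_nil, bLoop]
      rw [aLoop.eq_def]
      rw [dif_neg (by rw [find_at x hbuf]; omega)]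
      simp only [find_at x hbuf]
      rw [dif_pos (findFrom_no_close buf x (hcb x rfl))]
  | cons c t ih =>
    intro ch ly buf cb hsp hbuf hcb
    have hsp' : ' ' ∉ t := fun h => hsp (List.mem_cons_of_mem _ h)
    have hc : c ≠ ' ' := by
      intro h
      apply hsp
      rw [h]
      exact List.mem_cons_self
    cases cb with
    | none =>
      by_cases hb : c = '['
      · subst hb
        have harr : buf ++ cbRest none ++ '[' :: t = buf ++ cbRest (some []) ++ t := by
          simp [cbRest]
        rw [harr, ih ch ly buf (some []) hsp' hbuf (by intro x hx; cases hx; simp)]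
        simp [bLoop, hc]
      · have harr : buf ++ cbRest none ++ c :: t = (buf ++ [c]) ++ cbRest none ++ t := by
          simp [cbRest]
        have hbuf' : '[' ∉ buf ++ [c] := by
          intro hmem
          rcases List.mem_append.1 hmem with hm | hm
          · exact hbuf hm
          · simp only [List.mem_singleton] at hm
            exact hb hm.symm
        rw [harr, ih ch ly (buf ++ [c]) none hsp' hbuf' (by intro x hx; cases hx)]
        simp [bLoop, hc, hb]
    | some x =>
      have hx : ']' ∉ x := hcb x rfl
      by_cases hb : c = ']'
      · subst hb
        -- one real step of A's loop
        have hshape : buf ++ cbRest (some x) ++ ']' :: t = buf ++ '[' :: (x ++ ']' :: t) := by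
          simp [cbRest]
        rw [hshape]
        rw [aLoop.eq_def]
        rw [dif_neg (by rw [find_at _ hbuf]; omega)]
        simp only [find_at _ hbuf]
        rw [dif_neg (by rw [findFrom_close buf x t hx]; omega)]
        simp only [findFrom_close buf x t hx]
        -- evaluate the three slices
        have hbefore : PySem.Chars.slice (buf ++ '[' :: (x ++ ']' :: t)) none
            (some (buf.length : Int)) = buf := by
          simp only [PySem.Chars.slice_eq_listSlice]
          rw [PySem.List.slice_to _ (by omega)]
          simp only [Int.toNat_natCast]
          exact List.take_left
        have hchord : PySem.Chars.slice (buf ++ '[' :: (x ++ ']' :: t))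
            (some ((buf.length : Int) + 1)) (some ((buf.length + 1 + x.length : Nat) : Int))
            = x := by
          simp only [PySem.Chars.slice_eq_listSlice]
          rw [aux_cast, PySem.List.slice_natCast]
          have hdrop : (buf ++ '[' :: (x ++ ']' :: t)).drop (buf.length + 1)
              = x ++ ']' :: t := by
            rw [show buf ++ '[' :: (x ++ ']' :: t) = (buf ++ ['[']) ++ (x ++ ']' :: t) by simp]
            rw [List.drop_left' (by simp)]
          rw [hdrop]
          have harith : buf.length + 1 + x.length - (buf.length + 1) = x.length := by omega
          rw [harith]
          exact List.take_left
        have hafter : PySem.Chars.slice (buf ++ '[' :: (x ++ ']' :: t))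
            (some (((buf.length + 1 + x.length : Nat) : Int) + 1)) none = t := by
          simp only [PySem.Chars.slice_eq_listSlice]
          rw [show (((buf.length + 1 + x.length : Nat) : Int) + 1)
              = ((buf.length + 1 + x.length + 1 : Nat) : Int) by push_cast; ring]
          rw [PySem.List.slice_from _ (by omega)]
          simp only [Int.toNat_natCast]
          rw [show buf ++ '[' :: (x ++ ']' :: t)
              = (buf ++ '[' :: (x ++ [']'])) ++ t by simp]
          rw [List.drop_left' (by simp; omega)]
        rw [hbefore, hchord, hafter]
        have hih := ih (ch ++ [x]) (ly ++ [buf]) [] none hsp' (by simp) (by intro y hy; cases hy)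
        have hnil : cbRest none = [] := rfl
        rw [hnil] at hih
        simp only [List.append_nil, List.nil_append] at hih
        rw [hih]
        simp [bLoop, hc]
      · have harr : buf ++ cbRest (some x) ++ c :: t = buf ++ cbRest (some (x ++ [c])) ++ t := by
          simp [cbRest]
        have hx' : ∀ y, some (x ++ [c]) = some y → ']' ∉ y := by
          intro y hy
          cases hy
          intro hmem
          rcases List.mem_append.1 hmem with hm | hm
          · exact hx hm
          · simp only [List.mem_singleton] at hm
            exact hb hm.symm
        rw [harr, ih ch ly buf (some (x ++ [c])) hsp' hbuf hx']
        simp [bLoop, hc, hb]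

lemma flatMap_single (L : List (List Char)) (g : List Char → List Char) :
    L.flatMap (fun c => [g c]) = L.map g := by
  induction L with
  | nil => simp
  | cons p r ih => simp [ih]

lemma join_nil_eq_flatten (ps : List (List Char)) : PySem.Chars.join [] ps = ps.flatten := by
  induction ps with
  | nil => simp [PySem.Chars.join_nil]
  | cons p rest ih =>
    cases rest with
    | nil => simp [PySem.Chars.join_singleton]
    | cons q r =>
      rw [PySem.Chars.join_cons_cons, ih]
      simp

lemma post_eq (mode : Int) (ch ly : List (List Char)) (restl : List Char) :
    aPost mode (ch, ly, restl) = bPost mode ch (ly ++ [restl]) := by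
  unfold aPost bPost
  simp only []
  have hne : ly ++ [restl] ≠ [] := by simp
  rw [if_congr (show ((ly ++ [restl] ≠ []) ∧ (ly ++ [restl]).headD [] = [])
      ↔ ((ly ++ [restl]).headD [] = []) by simp [hne]) rfl rfl]
  set strp := if (ly ++ [restl]).headD [] = [] then
      (PySem.List.slice ch (some 1) none, PySem.List.slice (ly ++ [restl]) (some 1) none)
    else (ch, ly ++ [restl]) with hstrp
  rw [if_congr (show (strp.2 = [] ∨ strp.2.all (fun p => p == []) = true)
      ↔ (strp.2.all (fun p => p == []) = true) by
    constructor
    · rintro (h | h)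
      · rw [h]; rfl
      · exact h
    · intro h; exact Or.inr h) rfl rfl]
  by_cases hbr : strp.2.all (fun p => p == []) = true
  · rw [if_pos hbr, if_pos hbr]
  · rw [if_neg hbr, if_neg hbr]
    by_cases hdiv : strp.2.length = 1 ∧ (strp.1 = [] ∨ strp.1.headD [] = [])
    · rw [if_pos hdiv, if_pos hdiv]
    · rw [if_neg hdiv, if_neg hdiv]
      congr 1
      rw [PySem.List.foldl_append_eq_flatMap, PySem.List.foldl_append_eq_flatMap]
      rw [flatMap_single, flatMap_single]
      rw [join_nil_eq_flatten, join_nil_eq_flatten, join_nil_eq_flatten]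
      have h1 : ("<TABLE cellpadding=\"0\" cellspacing=\"0\"><TR>" : String).toList
          = ("<TABLE cellpadding=\"0\" cellspacing=\"0\">" : String).toList
            ++ ("<TR>" : String).toList := by decide
      have h2 : ("</TR><TR>" : String).toList
          = ("</TR>" : String).toList ++ ("<TR>" : String).toList := by decide
      rw [h1, h2]
      simp [List.flatten_append, List.append_assoc]

-- ===== VERDICT (by name: the statement is the Claim_ definition above) =====
theorem parse_chopro_line_spec : Claim_equal_parse_chopro_line := by
  intro line mode _ _
  unfold Spec_parse_chopro_line parse_chopro_line parse_chopro_line_alt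
  rw [replace_space, bLoop_spaceExp]
  have h := aLoop_eq_bLoop (spaceExp line.toList) [[]] [] [] none
    (no_space_spaceExp _) (by simp) (by intro x hx; cases hx)
  have hnil : cbRest none = [] := rfl
  rw [hnil] at h
  simp only [List.append_nil, List.nil_append] at h
  rw [h, post_eq]
  congr 1
  cases hcb : (bLoop (spaceExp line.toList) [[]] [] [] none).2.2.2 with
  | none => simp [cbRest]
  | some x => simp [cbRest]
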